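-- pv_equiv track=rewrite | github.com/SteveParadox/Anfinity | Server/app/services/semantic_search.py | _extract_highlight
-- ===== SOURCE A (Python) =====
-- def _extract_highlight(content: str, query: str) -> str:
--     if not content:
--         return ""
--
--     query_terms = [term.lower() for term in query.split() if len(term) > 3]
--     if not query_terms:
--         return content[:200] + "..." if len(content) > 200 else content
--
--     content_lower = content.lower()
--     earliest_match = None
--     earliest_pos = len(content)
--
--     for term in query_terms:
--         pos = content_lower.find(term)
--         if pos != -1 and pos < earliest_pos:
--             earliest_pos = pos
--             earliest_match = pos
--
--     if earliest_match is None: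
--         return content[:200] + "..." if len(content) > 200 else content
--
--     start = max(0, earliest_match - 80)
--     end = min(len(content), earliest_match + 200)
--     prefix = "..." if start > 0 else ""
--     suffix = "..." if end < len(content) else ""
--     return prefix + content[start:end] + suffix
-- ===== SOURCE B (Python) =====
-- def _extract_highlight(content: str, query: str) -> str:
--     if not content:
--         return ""
--
--     terms = [t.lower() for t in query.split() if len(t) > 3]
--     if not terms:
--         return content[:200] + "..." if len(content) > 200 else content
--
--     content_lower = content.lower()
--     pos = None
--     for i in range(len(content_lower)):
--         if any(content_lower.startswith(t, i) for t in terms):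
--             pos = i
--             break
--
--     if pos is None:
--         return content[:200] + "..." if len(content) > 200 else content
--
--     start = pos - 80 if pos > 80 else 0
--     end = min(len(content), pos + 200)
--     prefix = "..." if start > 0 else ""
--     suffix = "..." if end < len(content) else ""
--     return prefix + content[start:end] + suffix
-- ===== Notes on version B (the rewrite author's own statement) =====
-- stated objective: alternative
-- what changed: Replaces the term-major loop (one str.find per term, keeping a running minimum) by a position-major single left-to-right scan over the lowered content that stops at the first index where any term starts.
import Mathlib
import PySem

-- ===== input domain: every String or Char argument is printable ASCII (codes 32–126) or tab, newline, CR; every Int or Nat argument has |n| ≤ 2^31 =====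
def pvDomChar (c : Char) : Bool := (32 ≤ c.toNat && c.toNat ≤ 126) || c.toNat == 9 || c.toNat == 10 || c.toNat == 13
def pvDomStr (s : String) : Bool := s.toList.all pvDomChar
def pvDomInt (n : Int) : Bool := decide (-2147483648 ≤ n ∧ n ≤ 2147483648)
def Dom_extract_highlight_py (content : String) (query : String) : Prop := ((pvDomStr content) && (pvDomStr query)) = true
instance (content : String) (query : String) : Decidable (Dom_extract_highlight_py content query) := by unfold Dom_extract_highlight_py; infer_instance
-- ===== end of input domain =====

-- B replaces A's per-term find loop with a single position-major scan for the first index where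
-- any query term starts (objective: alternative); return values proved equal on all inputs.


-- ===== PORT A =====
-- literal transliteration of A: per-term content_lower.find(term) computing a running minimum
def extract_highlight_py (content : String) (query : String) : String :=
  let c := content.toList
  if c = [] then "" else
  let query_terms := ((PySem.Chars.split₀ query.toList).filter
      (fun term => decide (3 < term.length))).map PySem.Chars.lower
  if query_terms = [] then
    (if 200 < c.length then String.ofList (PySem.List.slice c none (some 200) ++ "...".toList)
     else content) else
  let content_lower := PySem.Chars.lower c
  let st := query_terms.foldl (fun (s : Int × Option Int) term =>
      let pos := PySem.Chars.find content_lower term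
      if pos ≠ -1 ∧ pos < s.1 then (pos, some pos) else s) (((c.length : Int)), none)
  match st.2 with
  | none =>
    (if 200 < c.length then String.ofList (PySem.List.slice c none (some 200) ++ "...".toList)
     else content)
  | some earliest_match =>
    let start : Int := max 0 (earliest_match - 80)
    let e : Int := min (c.length : Int) (earliest_match + 200)
    let pre := if 0 < start then "...".toList else []
    let suf := if e < (c.length : Int) then "...".toList else []
    String.ofList (pre ++ PySem.List.slice c (some start) (some e) ++ suf)

-- ===== PORT B =====
-- B's scan: walk the suffixes of the lowered content, return the first index where some term starts
def pvScanB (terms : List (List Char)) : List Char → Nat → Option Nat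
  | [], _ => none
  | c :: cs, i =>
    if terms.any (fun t => PySem.Chars.startswith (c :: cs) t) then some i
    else pvScanB terms cs (i + 1)

def extract_highlight_py_alt (content : String) (query : String) : String :=
  let c := content.toList
  if c = [] then "" else
  let terms := ((PySem.Chars.split₀ query.toList).filter
      (fun term => decide (3 < term.length))).map PySem.Chars.lower
  if terms = [] then
    (if 200 < c.length then String.ofList (PySem.List.slice c none (some 200) ++ "...".toList)
     else content) else
  let content_lower := PySem.Chars.lower c
  match pvScanB terms content_lower 0 with
  | none =>
    (if 200 < c.length then String.ofList (PySem.List.slice c none (some 200) ++ "...".toList)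
     else content)
  | some pos =>
    let start : Nat := if 80 < pos then pos - 80 else 0
    let e : Nat := min c.length (pos + 200)
    let pre := if 0 < start then "...".toList else []
    let suf := if e < c.length then "...".toList else []
    String.ofList (pre ++ (c.drop start).take (e - start) ++ suf)

-- ===== PRECONDITION & SPEC =====
def Spec_extract_highlight_py (content : String) (query : String) (out : String) : Prop := out = extract_highlight_py_alt content query
instance (content : String) (query : String) (out : String) : Decidable (Spec_extract_highlight_py content query out) := by unfold Spec_extract_highlight_py; infer_instance

-- ===== CLAIM (what is proved, stated in full; the proofs are below) =====
def Claim_equal_extract_highlight_py : Prop := ∀ (content : String) (query : String), Dom_extract_highlight_py content query → Spec_extract_highlight_py content query (extract_highlight_py content query)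


-- ===== LEMMAS AND PROOFS =====

-- the min-of-finds that A's loop state tracks in its first component
def pvMin (cl : List Char) (ts : List (List Char)) (p : Int) : Int :=
  ts.foldl (fun p t => if PySem.Chars.find cl t = -1 then p else min p (PySem.Chars.find cl t)) p

-- "some query term starts at position j of cl"
def pvQ (ts : List (List Char)) (cl : List Char) (j : Nat) : Bool :=
  ts.any (fun t => PySem.Chars.startswith (cl.drop j) t)

lemma pvMin_le (cl : List Char) : ∀ (ts : List (List Char)) (p : Int), pvMin cl ts p ≤ p := by
  intro ts
  induction ts with
  | nil => intro p; simp [pvMin]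
  | cons t ts ih =>
    intro p
    simp only [pvMin, List.foldl_cons]
    split_ifs with h
    · exact ih p
    · exact le_trans (ih _) (min_le_left _ _)

lemma pvMin_le_find (cl : List Char) : ∀ (ts : List (List Char)) (p : Int) (t : List Char),
    t ∈ ts → PySem.Chars.find cl t ≠ -1 → pvMin cl ts p ≤ PySem.Chars.find cl t := by
  intro ts
  induction ts with
  | nil => intro p t h; simp at h
  | cons u ts ih =>
    intro p t ht hf
    rcases List.mem_cons.mp ht with rfl | ht
    · simp only [pvMin, List.foldl_cons, if_neg hf]
      exact le_trans (pvMin_le cl ts _) (min_le_right _ _)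
    · simp only [pvMin, List.foldl_cons]
      split_ifs with h
      · exact ih p t ht hf
      · exact ih _ t ht hf

lemma pvMin_cases (cl : List Char) : ∀ (ts : List (List Char)) (p : Int),
    pvMin cl ts p = p ∨ ∃ t ∈ ts, PySem.Chars.find cl t ≠ -1 ∧ pvMin cl ts p = PySem.Chars.find cl t := by
  intro ts
  induction ts with
  | nil => intro p; left; simp [pvMin]
  | cons u ts ih =>
    intro p
    simp only [pvMin, List.foldl_cons]
    split_ifs with h
    · rcases ih p with h1 | ⟨t, ht, hf, he⟩
      · left; exact h1
      · right; exact ⟨t, List.mem_cons_of_mem _ ht, hf, he⟩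
    · rcases ih (min p (PySem.Chars.find cl u)) with h1 | ⟨t, ht, hf, he⟩
      · by_cases hle : p ≤ PySem.Chars.find cl u
        · left
          show pvMin cl ts (min p (PySem.Chars.find cl u)) = p
          rw [h1, min_eq_left hle]
        · right
          refine ⟨u, List.mem_cons_self, h, ?_⟩
          show pvMin cl ts (min p (PySem.Chars.find cl u)) = PySem.Chars.find cl u
          rw [h1, min_eq_right (not_le.mp hle).le]
      · right; exact ⟨t, List.mem_cons_of_mem _ ht, hf, he⟩

lemma pvMin_all_none (cl : List Char) : ∀ (ts : List (List Char)) (p : Int),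
    (∀ t ∈ ts, PySem.Chars.find cl t = -1) → pvMin cl ts p = p := by
  intro ts
  induction ts with
  | nil => intro p _; simp [pvMin]
  | cons u ts ih =>
    intro p h
    simp only [pvMin, List.foldl_cons, if_pos (h u List.mem_cons_self)]
    exact ih p (fun t ht => h t (List.mem_cons_of_mem _ ht))

-- A's fold over (pos, match) is determined by the running minimum alone
lemma pvFoldA (cl : List Char) (n : Int) : ∀ (ts : List (List Char)) (p : Int),
    (∀ t ∈ ts, PySem.Chars.find cl t ≠ -1 → PySem.Chars.find cl t < n) → p ≤ n →
    ts.foldl (fun (s : Int × Option Int) term =>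
        let pos := PySem.Chars.find cl term
        if pos ≠ -1 ∧ pos < s.1 then (pos, some pos) else s)
      (p, if p < n then some p else none)
    = (pvMin cl ts p, if pvMin cl ts p < n then some (pvMin cl ts p) else none) := by
  intro ts
  induction ts with
  | nil => intro p _ _; simp [pvMin]
  | cons u ts ih =>
    intro p h hp
    simp only [List.foldl_cons, pvMin, ne_eq]
    by_cases hu : PySem.Chars.find cl u = -1
    · simp only [hu, not_true_eq_false, false_and, if_false, if_pos]
      have := ih p (fun t ht => h t (List.mem_cons_of_mem _ ht)) hp
      simpa [pvMin, hu] using this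
    · by_cases hlt : PySem.Chars.find cl u < p
      · have hmin : min p (PySem.Chars.find cl u) = PySem.Chars.find cl u := min_eq_right hlt.le
        have hfn : PySem.Chars.find cl u < n := h u List.mem_cons_self hu
        have := ih (PySem.Chars.find cl u) (fun t ht => h t (List.mem_cons_of_mem _ ht)) hfn.le
        simp only [hu, not_false_eq_true, true_and, hlt, if_pos, hmin]
        simpa [pvMin, if_pos hfn] using this
      · have hmin : min p (PySem.Chars.find cl u) = p := min_eq_left (not_lt.mp hlt)
        have := ih p (fun t ht => h t (List.mem_cons_of_mem _ ht)) hp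
        simp only [hu, not_false_eq_true, true_and, hlt, if_false, hmin]
        simpa [pvMin] using this

lemma pvQ_drop (ts : List (List Char)) (c : Char) (cs : List Char) (j : Nat) :
    pvQ ts (c :: cs) (j + 1) = pvQ ts cs j := by
  simp [pvQ]

lemma pvQ_nil (ts : List (List Char)) (hne : ∀ t ∈ ts, t ≠ []) (j : Nat) :
    pvQ ts [] j = false := by
  simp only [pvQ, List.drop_nil, List.any_eq_false]
  intro t ht hsw
  exact hne t ht (List.prefix_nil.mp ((PySem.Chars.startswith_iff _ _).mp hsw))

lemma pvScanB_none (ts : List (List Char)) (hne : ∀ t ∈ ts, t ≠ []) :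
    ∀ (cs : List Char) (i : Nat), pvScanB ts cs i = none ↔ ∀ j, pvQ ts cs j = false := by
  intro cs
  induction cs with
  | nil =>
    intro i
    constructor
    · intro _ j; exact pvQ_nil ts hne j
    · intro _; rfl
  | cons c cs ih =>
    intro i
    simp only [pvScanB]
    by_cases h0 : pvQ ts (c :: cs) 0 = true
    · rw [if_pos (by simpa [pvQ] using h0)]
      simp only [reduceCtorEq, false_iff, not_forall]
      exact ⟨0, by simp [h0]⟩
    · rw [if_neg (by simpa [pvQ] using h0)]
      rw [ih (i + 1)]
      constructor
      · intro h j
        cases j with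
        | zero => simpa using h0
        | succ j => rw [pvQ_drop]; exact h j
      · intro h j
        rw [← pvQ_drop ts c cs j]; exact h (j + 1)

lemma pvScanB_some (ts : List (List Char)) (hne : ∀ t ∈ ts, t ≠ []) :
    ∀ (cs : List Char) (i r : Nat), pvScanB ts cs i = some r ↔
      (i ≤ r ∧ pvQ ts cs (r - i) = true ∧ ∀ k < r - i, pvQ ts cs k = false) := by
  intro cs
  induction cs with
  | nil =>
    intro i r
    simp only [pvScanB, reduceCtorEq, false_iff]
    rintro ⟨-, hq, -⟩
    rw [pvQ_nil ts hne] at hq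
    exact absurd hq (by simp)
  | cons c cs ih =>
    intro i r
    simp only [pvScanB]
    by_cases h0 : pvQ ts (c :: cs) 0 = true
    · rw [if_pos (by simpa [pvQ] using h0)]
      constructor
      · rintro h
        injection h with h; subst h
        exact ⟨le_refl i, by simpa using h0, by omega⟩
      · rintro ⟨hir, _, hmin⟩
        by_cases hri : r = i
        · simp [hri]
        · exact absurd h0 (by simpa using hmin 0 (by omega))
    · rw [if_neg (by simpa [pvQ] using h0)]
      rw [ih (i + 1) r]
      constructor
      · rintro ⟨hir, hq, hmin⟩
        refine ⟨by omega, ?_, ?_⟩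
        · have : r - i = (r - (i + 1)) + 1 := by omega
          rw [this, pvQ_drop]; exact hq
        · intro k hk
          cases k with
          | zero => simpa using h0
          | succ k => rw [pvQ_drop]; exact hmin k (by omega)
      · rintro ⟨hir, hq, hmin⟩
        have hri : r ≠ i := by
          intro h; subst h
          exact h0 (by simpa using hq)
        refine ⟨by omega, ?_, ?_⟩
        · have : r - i = (r - (i + 1)) + 1 := by omega
          rw [this, pvQ_drop] at hq; exact hq
        · intro k hk
          rw [← pvQ_drop ts c cs k]
          exact hmin (k + 1) (by omega)

lemma pvQ_true_iff (ts : List (List Char)) (cl : List Char) (j : Nat) :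
    pvQ ts cl j = true ↔ ∃ t ∈ ts, t <+: cl.drop j := by
  simp only [pvQ, List.any_eq_true]
  constructor
  · rintro ⟨t, ht, hsw⟩; exact ⟨t, ht, (PySem.Chars.startswith_iff _ _).mp hsw⟩
  · rintro ⟨t, ht, hp⟩; exact ⟨t, ht, (PySem.Chars.startswith_iff _ _).mpr hp⟩

lemma pvPrefix_lt_length {t cl : List Char} {j : Nat} (hne : t ≠ []) (h : t <+: cl.drop j) :
    j < cl.length := by
  by_contra hj
  rw [List.drop_eq_nil_of_le (by omega)] at h
  exact hne (List.prefix_nil.mp h)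

-- the core bridge: A's minimum-of-finds packaging equals B's first-position scan
lemma pvCore (ts : List (List Char)) (cl : List Char) (hne : ∀ t ∈ ts, t ≠ []) :
    (if pvMin cl ts (cl.length : Int) < (cl.length : Int)
       then some (pvMin cl ts (cl.length : Int)) else none)
    = (pvScanB ts cl 0).map (fun k : Nat => (k : Int)) := by
  cases hscan : pvScanB ts cl 0 with
  | none =>
    have hall : ∀ j, pvQ ts cl j = false := (pvScanB_none ts hne cl 0).mp hscan
    have hfind : ∀ t ∈ ts, PySem.Chars.find cl t = -1 := by
      intro t ht
      by_contra hf
      have h0 : 0 ≤ PySem.Chars.find cl t := by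
        have := PySem.Chars.neg_one_le_find cl t
        omega
      have hsp := (PySem.Chars.find_spec h0).1
      have : pvQ ts cl (PySem.Chars.find cl t).toNat = true :=
        (pvQ_true_iff ts cl _).mpr ⟨t, ht, hsp⟩
      rw [hall] at this
      exact absurd this (by simp)
    rw [pvMin_all_none cl ts _ hfind]
    simp
  | some r =>
    have hspec := (pvScanB_some ts hne cl 0 r).mp hscan
    simp only [Nat.sub_zero] at hspec
    obtain ⟨-, hq, hmin⟩ := hspec
    obtain ⟨t, ht, hp⟩ := (pvQ_true_iff ts cl r).mp hq
    have htne : t ≠ [] := hne t ht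
    have hrlen : r < cl.length := pvPrefix_lt_length htne hp
    -- find cl t ≤ r
    have htInf : t <:+: cl := hp.isInfix.trans (cl.drop_suffix r).isInfix
    have htf : PySem.Chars.find cl t ≠ -1 := (PySem.Chars.find_ne_neg_one_iff cl t).mpr htInf
    have h0t : 0 ≤ PySem.Chars.find cl t := by
      have := PySem.Chars.neg_one_le_find cl t
      omega
    have hfr : PySem.Chars.find cl t ≤ (r : Int) := by
      by_contra hgt
      exact (PySem.Chars.find_spec h0t).2 r (by omega) hp
    have hle : pvMin cl ts (cl.length : Int) ≤ (r : Int) :=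
      le_trans (pvMin_le_find cl ts _ t ht htf) hfr
    have hge : (r : Int) ≤ pvMin cl ts (cl.length : Int) := by
      rcases pvMin_cases cl ts (cl.length : Int) with he | ⟨u, hu, huf, hue⟩
      · omega
      · have h0u : 0 ≤ PySem.Chars.find cl u := by
          have := PySem.Chars.neg_one_le_find cl u
          omega
        have hup := (PySem.Chars.find_spec h0u).1
        have hQu : pvQ ts cl (PySem.Chars.find cl u).toNat = true :=
          (pvQ_true_iff ts cl _).mpr ⟨u, hu, hup⟩
        by_contra hlt
        have : (PySem.Chars.find cl u).toNat < r := by omega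
        rw [hmin _ this] at hQu
        exact absurd hQu (by simp)
    have heq : pvMin cl ts (cl.length : Int) = (r : Int) := le_antisymm hle hge
    rw [heq, if_pos (by exact_mod_cast hrlen)]
    rfl

-- ===== VERDICT (by name: the statement is the Claim_ definition above) =====
theorem extract_highlight_py_spec : Claim_equal_extract_highlight_py := by
  intro content query _
  show extract_highlight_py content query = extract_highlight_py_alt content query
  unfold extract_highlight_py extract_highlight_py_alt
  dsimp only
  by_cases hc : content.toList = []
  · rw [if_pos hc, if_pos hc]
  · rw [if_neg hc, if_neg hc]
    set qt := ((PySem.Chars.split₀ query.toList).filter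
        (fun term => decide (3 < term.length))).map PySem.Chars.lower with hqt
    by_cases hts : qt = []
    · rw [if_pos hts, if_pos hts]
    · rw [if_neg hts, if_neg hts]
      set c := content.toList with hcdef
      set cl := PySem.Chars.lower c with hcl
      have hlen : cl.length = c.length := by simp [hcl, PySem.Chars.lower]
      have hne : ∀ t ∈ qt, t ≠ [] := by
        intro t ht hnil
        rw [hqt] at ht
        obtain ⟨t0, ht0, rfl⟩ := List.mem_map.mp ht
        have h3 := (List.mem_filter.mp ht0).2
        simp only [decide_eq_true_eq] at h3
        have hl : (PySem.Chars.lower t0).length = t0.length := by simp [PySem.Chars.lower]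
        rw [hnil] at hl
        simp at hl
        omega
      have hfind : ∀ t ∈ qt, PySem.Chars.find cl t ≠ -1 →
          PySem.Chars.find cl t < (c.length : Int) := by
        intro t ht hf
        have h0 : 0 ≤ PySem.Chars.find cl t := by
          have := PySem.Chars.neg_one_le_find cl t
          omega
        have hsp := (PySem.Chars.find_spec h0).1
        have := pvPrefix_lt_length (hne t ht) hsp
        rw [hlen] at this
        omega
      have hA := pvFoldA cl (c.length : Int) qt (c.length : Int) hfind le_rfl
      rw [if_neg (lt_irrefl _)] at hA
      rw [hA]
      have hcore := pvCore qt cl hne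
      rw [hlen] at hcore
      dsimp only
      rw [hcore]
      cases hscan : pvScanB qt cl 0 with
      | none => rfl
      | some r =>
        dsimp only [Option.map]
        have hstart : max 0 ((r : Int) - 80) = ((if 80 < r then r - 80 else 0 : Nat) : Int) := by
          split_ifs with h <;> omega
        have hend : min (c.length : Int) ((r : Int) + 200)
            = ((min c.length (r + 200) : Nat) : Int) := by omega
        rw [hstart, hend, PySem.List.slice_natCast]
        simp only [Nat.cast_pos, Nat.cast_lt]
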